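-- pv_equiv track=rewrite | github.com/rohanraaj2/Programming-Fundamentals | Lab 11/8.py | special_numbers
-- ===== SOURCE A (Python) =====
-- def prime_factors(num):
--     s = []
--     d = 2
--     while num >= d:
--         while num % d == 0:
--             s.append(d)
--             num = num // d
--         d += 1
--     return s
--
-- def special_numbers(num):
--     s = 0
--     x = []
--     for i in range (num + 1):
--         s = 0
--         l = prime_factors(i)
--         for j in l:
--             s += j
--         if i == s:
--             x.append(s)
--     return x
-- ===== SOURCE B (Python) =====
-- def _is_prime(n):
--     if n < 2:
--         return False
--     d = 2
--     while d * d <= n: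
--         if n % d == 0:
--             return False
--         d += 1
--     return True
--
-- def special_numbers(num):
--     # n equals the sum of its prime factors (with multiplicity) exactly when
--     # n is 0 (empty sum), n is 4 (2+2), or n is prime (sum = n itself).
--     x = []
--     for i in range(num + 1):
--         if i == 0 or i == 4 or _is_prime(i):
--             x.append(i)
--     return x
-- ===== Notes on version B (the rewrite author's own statement) =====
-- stated objective: faster
-- what changed: Instead of computing the full prime factorisation of every i and summing it, B uses the number-theoretic characterisation that i equals the sum of its prime factors (with multiplicity) exactly when i is 0, 4 or prime, and tests primality by trial division up to sqrt(i).
import Mathlib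
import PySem

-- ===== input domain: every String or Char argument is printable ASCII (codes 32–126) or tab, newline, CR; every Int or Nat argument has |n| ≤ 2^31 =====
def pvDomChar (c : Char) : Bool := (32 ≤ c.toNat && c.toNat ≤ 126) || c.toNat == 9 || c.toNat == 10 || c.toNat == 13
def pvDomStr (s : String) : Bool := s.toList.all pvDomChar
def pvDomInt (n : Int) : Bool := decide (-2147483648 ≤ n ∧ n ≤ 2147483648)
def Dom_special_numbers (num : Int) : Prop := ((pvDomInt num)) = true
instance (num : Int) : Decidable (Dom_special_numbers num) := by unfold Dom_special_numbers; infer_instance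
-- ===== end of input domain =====

-- B replaces A's per-number full factorisation by the characterisation
-- "i = sum of its prime factors iff i ∈ {0, 4} or i is prime" with a √i trial-division primality test.

-- ===== PORT A =====
-- inner `while num % d == 0` loop of prime_factors (fuel makes the Int recursion total; with the
-- fuel A's port receives it is always sufficient, which the proofs establish)
def pvDivOut : Nat → Int → Int → List Int → List Int × Int
  | 0, num, _, s => (s, num)
  | f + 1, num, d, s =>
    if PySem.Int.mod num d = 0 then pvDivOut f (PySem.Int.floordiv num d) d (s ++ [d])
    else (s, num)

-- outer `while num >= d` loop of prime_factors
def pvPfOuter : Nat → Int → Int → List Int → List Int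
  | 0, _, _, s => s
  | f + 1, num, d, s =>
    if d ≤ num then
      let p := pvDivOut (num.toNat + 1) num d s
      pvPfOuter f p.2 (d + 1) p.1
    else s

def pvPrimeFactors (num : Int) : List Int := pvPfOuter (num.toNat + 1) num 2 []

def special_numbers (num : Int) : List Int :=
  (PySem.List.pyRange 0 (num + 1) 1).foldl
    (fun x i =>
      let l := pvPrimeFactors i
      let s := l.foldl (fun s j => s + j) 0
      if i = s then x ++ [s] else x) []

-- ===== PORT B =====
-- `while d * d <= n` loop of _is_prime
def pvIsPrimeLoop (n d : Int) : Bool :=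
  if h : d * d ≤ n then
    if PySem.Int.mod n d = 0 then false else pvIsPrimeLoop n (d + 1)
  else true
termination_by (n + 1 - d).toNat
decreasing_by
  have h0 : 0 ≤ d * d := mul_self_nonneg d
  have hdn : d ≤ n := by
    by_cases hd : d ≤ 0
    · omega
    · nlinarith
  omega

def pvIsPrime (n : Int) : Bool :=
  if n < 2 then false else pvIsPrimeLoop n 2

def special_numbers_alt (num : Int) : List Int :=
  (PySem.List.pyRange 0 (num + 1) 1).foldl
    (fun x i => if i = 0 ∨ i = 4 ∨ pvIsPrime i = true then x ++ [i] else x) []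

-- ===== PRECONDITION & SPEC =====
def Spec_special_numbers (num : Int) (out : List Int) : Prop := out = special_numbers_alt num
instance (num : Int) (out : List Int) : Decidable (Spec_special_numbers num out) := by unfold Spec_special_numbers; infer_instance

-- ===== CLAIM (what is proved, stated in full; the proofs are below) =====
def Claim_equal_special_numbers : Prop := ∀ (num : Int), Dom_special_numbers num → Spec_special_numbers num (special_numbers num)

-- ===== LEMMAS AND PROOFS =====

-- the inner division loop removes the maximal power of d, appending one copy of d per division
lemma pvDivOut_spec (f : Nat) : ∀ (n d : Nat) (s : List Int), 2 ≤ d → 1 ≤ n → n ≤ f →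
    ∃ k m : Nat, pvDivOut f (n : Int) (d : Int) s = (s ++ List.replicate k (d : Int), (m : Int)) ∧
      n = d ^ k * m ∧ ¬ d ∣ m ∧ 1 ≤ m := by
  induction f with
  | zero => intro n d s hd hn hf; omega
  | succ f ih =>
    intro n d s hd hn hf
    by_cases hdvd : d ∣ n
    · have hmod : n % d = 0 := Nat.mod_eq_zero_of_dvd hdvd
      have h1 : 1 ≤ n / d := (Nat.one_le_div_iff (by omega)).mpr (Nat.le_of_dvd (by omega) hdvd)
      have h2 : n / d < n := Nat.div_lt_self (by omega) (by omega)
      obtain ⟨k, m, hres, heq, hnd, hm⟩ := ih (n / d) d (s ++ [(d : Int)]) hd h1 (by omega)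
      refine ⟨k + 1, m, ?_, ?_, hnd, hm⟩
      · simp only [pvDivOut, PySem.Int.mod_natCast, PySem.Int.floordiv_natCast, hmod,
          Nat.cast_zero]
        rw [hres, List.replicate_succ]
        simp
      · have hmul : d * (n / d) = n := Nat.mul_div_cancel' hdvd
        calc n = d * (n / d) := hmul.symm
          _ = d * (d ^ k * m) := by rw [heq]
          _ = d ^ (k + 1) * m := by ring
    · refine ⟨0, n, ?_, by simp, hdvd, hn⟩
      simp [pvDivOut, PySem.Int.mod_natCast, Int.natCast_dvd_natCast, hdvd]

-- sums of prime-factor lists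
lemma sum_pf_mul (a b : Nat) (ha : a ≠ 0) (hb : b ≠ 0) :
    (Nat.primeFactorsList (a * b)).sum = (Nat.primeFactorsList a).sum + (Nat.primeFactorsList b).sum := by
  have h := Nat.perm_primeFactorsList_mul ha hb
  rw [h.sum_eq, List.sum_append]

lemma sum_pf_pow (d k : Nat) (hd : d.Prime) :
    (Nat.primeFactorsList (d ^ k)).sum = k * d := by
  rw [hd.primeFactorsList_pow]
  simp [List.sum_replicate, smul_eq_mul]

-- the outer loop accumulates exactly the prime factors (in some order); we track the sum
lemma pvPfOuter_sum (f : Nat) : ∀ (n d : Nat) (s : List Int), 2 ≤ d → 1 ≤ n →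
    (∀ q, 2 ≤ q → q < d → ¬ q ∣ n) → n + 1 ≤ f + d →
    ∃ t : List Int, pvPfOuter f (n : Int) (d : Int) s = s ++ t ∧
      t.sum = ((Nat.primeFactorsList n).sum : Int) := by
  induction f with
  | zero =>
    intro n d s hd hn hq hfuel
    have hn1 : n = 1 := by
      by_contra hc
      have hp := Nat.minFac_prime (show n ≠ 1 by omega)
      have hdvd := Nat.minFac_dvd n
      have hle : n.minFac ≤ n := Nat.le_of_dvd (by omega) hdvd
      exact hq n.minFac hp.two_le (by omega) hdvd
    subst hn1
    exact ⟨[], by simp [pvPfOuter], by simp [Nat.primeFactorsList_one]⟩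
  | succ f ih =>
    intro n d s hd hn hq hfuel
    by_cases hcond : (d : Int) ≤ (n : Int)
    · have hdn : d ≤ n := by exact_mod_cast hcond
      have htn : ((n : Int).toNat) = n := Int.toNat_natCast n
      obtain ⟨k, m, hres, heq, hndm, hm⟩ :=
        pvDivOut_spec ((n : Int).toNat + 1) n d s hd hn (by omega)
      have hmdvd : m ∣ n := ⟨d ^ k, by rw [heq]; ring⟩
      have hmn : m ≤ n := Nat.le_of_dvd (by omega) hmdvd
      have hq' : ∀ q, 2 ≤ q → q < d + 1 → ¬ q ∣ m := by
        intro q h2 hlt hdv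
        rcases Nat.lt_succ_iff_lt_or_eq.mp hlt with h | h
        · exact hq q h2 h (hdv.trans hmdvd)
        · exact hndm (h ▸ hdv)
      obtain ⟨t', hres', hsum'⟩ :=
        ih m (d + 1) (s ++ List.replicate k (d : Int)) (by omega) hm hq' (by omega)
      have hsumn : (Nat.primeFactorsList n).sum = k * d + (Nat.primeFactorsList m).sum := by
        by_cases hk : k = 0
        · subst hk; simp at heq; rw [heq]; simp
        · have hddvd : d ∣ n := by
            rw [heq]; exact Dvd.dvd.mul_right (dvd_pow_self d hk) m
          have hp := Nat.minFac_prime (show d ≠ 1 by omega)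
          have hfd : d.minFac ∣ n := (Nat.minFac_dvd d).trans hddvd
          have hnlt : ¬ d.minFac < d := fun hlt => hq d.minFac hp.two_le hlt hfd
          have hpd : d.minFac = d :=
            le_antisymm (Nat.minFac_le (by omega)) (by omega)
          have hdp : d.Prime := hpd ▸ hp
          rw [heq, sum_pf_mul _ _ (pow_ne_zero _ (by omega)) (by omega), sum_pf_pow d k hdp]
      refine ⟨List.replicate k (d : Int) ++ t', ?_, ?_⟩
      · simp only [pvPfOuter, if_pos hcond]
        rw [hres]
        have : ((d : Int) + 1) = ((d + 1 : Nat) : Int) := by push_cast; ring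
        rw [this, hres', List.append_assoc]
      · rw [List.sum_append, hsum', hsumn, List.sum_replicate]
        push_cast
        ring
    · have hnd : n < d := by
        have : (n : Int) < (d : Int) := by omega
        exact_mod_cast this
      have hn1 : n = 1 := by
        by_contra hc
        have hp := Nat.minFac_prime (show n ≠ 1 by omega)
        have hdvd := Nat.minFac_dvd n
        have hle : n.minFac ≤ n := Nat.le_of_dvd (by omega) hdvd
        exact hq n.minFac hp.two_le (by omega) hdvd
      subst hn1
      refine ⟨[], ?_, by simp [Nat.primeFactorsList_one]⟩
      simp only [pvPfOuter]
      rw [if_neg hcond]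
      simp

lemma sumA_eq (n : Nat) :
    (pvPrimeFactors (n : Int)).foldl (fun s j => s + j) 0 = ((Nat.primeFactorsList n).sum : Int) := by
  rcases Nat.eq_zero_or_pos n with h0 | h1
  · subst h0
    simp [pvPrimeFactors, pvPfOuter]
  · obtain ⟨t, hres, hsum⟩ := pvPfOuter_sum ((n : Int).toNat + 1) n 2 []
      (by omega) h1 (fun q hq1 hq2 _ => by omega) (by rw [Int.toNat_natCast]; omega)
    have h2 : ((2 : Nat) : Int) = 2 := by norm_num
    rw [h2] at hres
    unfold pvPrimeFactors
    rw [hres, List.nil_append]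
    rw [List.sum_eq_foldl] at hsum
    exact hsum

lemma sum_pf_le (n : Nat) (h : 1 ≤ n) : (Nat.primeFactorsList n).sum ≤ n := by
  induction n using Nat.strong_induction_on with
  | _ n ih =>
    by_cases h1 : n = 1
    · subst h1; simp [Nat.primeFactorsList_one]
    · by_cases hp : n.Prime
      · rw [Nat.primeFactorsList_prime hp]; simp
      · have hn2 : 2 ≤ n := by omega
        have hpm := Nat.minFac_prime h1
        have hdvd := Nat.minFac_dvd n
        have hmul : n.minFac * (n / n.minFac) = n := Nat.mul_div_cancel' hdvd
        have hm1 : n / n.minFac ≠ 1 := by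
          intro hc
          rw [hc, Nat.mul_one] at hmul
          exact hp (hmul ▸ hpm)
        have hm0 : 1 ≤ n / n.minFac := Nat.one_le_div_iff (hpm.pos) |>.mpr (Nat.le_of_dvd (by omega) hdvd)
        have hmlt : n / n.minFac < n := Nat.div_lt_self (by omega) hpm.one_lt
        have ihm := ih (n / n.minFac) hmlt (by omega)
        have hsplit : (Nat.primeFactorsList n).sum =
            n.minFac + (Nat.primeFactorsList (n / n.minFac)).sum := by
          conv_lhs => rw [← hmul]
          rw [sum_pf_mul _ _ hpm.ne_zero (by omega), Nat.primeFactorsList_prime hpm]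
          simp
        have h2p := hpm.two_le
        have h2m : 2 ≤ n / n.minFac := by omega
        nlinarith [hmul, hsplit, ihm]

lemma sum_pf_eq_iff (n : Nat) :
    (Nat.primeFactorsList n).sum = n ↔ n = 0 ∨ n = 4 ∨ n.Prime := by
  constructor
  · intro h
    by_contra hc
    push_neg at hc
    obtain ⟨h0, h4, hnp⟩ := hc
    by_cases h1 : n = 1
    · subst h1; simp [Nat.primeFactorsList_one] at h
    · have hn2 : 2 ≤ n := by omega
      have hpm := Nat.minFac_prime h1
      have hdvd := Nat.minFac_dvd n
      have hmul : n.minFac * (n / n.minFac) = n := Nat.mul_div_cancel' hdvd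
      have hm1 : n / n.minFac ≠ 1 := by
        intro hcm
        rw [hcm, Nat.mul_one] at hmul
        exact hnp (hmul ▸ hpm)
      have hm0 : 1 ≤ n / n.minFac := Nat.one_le_div_iff (hpm.pos) |>.mpr (Nat.le_of_dvd (by omega) hdvd)
      have hmlt : n / n.minFac < n := Nat.div_lt_self (by omega) hpm.one_lt
      have hle := sum_pf_le (n / n.minFac) hm0
      have hsplit : (Nat.primeFactorsList n).sum =
          n.minFac + (Nat.primeFactorsList (n / n.minFac)).sum := by
        conv_lhs => rw [← hmul]
        rw [sum_pf_mul _ _ hpm.ne_zero (by omega), Nat.primeFactorsList_prime hpm]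
        simp
      have h2p := hpm.two_le
      have h2m : 2 ≤ n / n.minFac := by omega
      have hnot : ¬ (n.minFac = 2 ∧ n / n.minFac = 2) := by
        intro ⟨ha, hb⟩
        rw [ha] at hb hmul
        rw [hb] at hmul
        omega
      -- p + m < p * m unless p = m = 2
      have hlt : n.minFac + n / n.minFac < n.minFac * (n / n.minFac) := by
        by_cases hp2 : n.minFac = 2
        · have : 3 ≤ n / n.minFac := by
            rcases Nat.lt_or_ge (n / n.minFac) 3 with h | h
            · exfalso; exact hnot ⟨hp2, by omega⟩
            · exact h
          nlinarith
        · have : 3 ≤ n.minFac := by omega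
          nlinarith
      omega
  · rintro (h | h | h)
    · subst h; simp
    · subst h
      rw [show (4 : Nat) = 2 ^ 2 by norm_num, Nat.Prime.primeFactorsList_pow Nat.prime_two]
      simp
    · rw [Nat.primeFactorsList_prime h]; simp

lemma pvIsPrimeLoop_iff (n : Int) : ∀ (d : Int), 2 ≤ d →
    (pvIsPrimeLoop n d = true ↔ ∀ e : Int, d ≤ e → e * e ≤ n → PySem.Int.mod n e ≠ 0) := by
  intro d
  fun_induction pvIsPrimeLoop n d with
  | case1 d h hmod =>
      intro hd2
      simp only [Bool.false_eq_true, false_iff]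
      push_neg
      exact ⟨d, le_rfl, h, hmod⟩
  | case2 d h hmod ih =>
      intro hd2
      rw [ih (by omega)]
      constructor
      · intro hAll e hde hee
        rcases eq_or_lt_of_le hde with heq | hlt
        · exact heq ▸ hmod
        · exact hAll e (by omega) hee
      · intro hAll e hde hee
        exact hAll e (by omega) hee
  | case3 d h =>
      intro hd2
      simp only [true_iff]
      intro e h1 h2
      exfalso
      have := mul_le_mul h1 h1 (by omega) (by omega)
      omega


lemma pvIsPrime_iff (n : Nat) : pvIsPrime (n : Int) = true ↔ n.Prime := by
  unfold pvIsPrime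
  by_cases h2 : (n : Int) < 2
  · have hn : n < 2 := by exact_mod_cast h2
    rw [if_pos h2]
    simp only [Bool.false_eq_true, false_iff]
    intro hp
    have := hp.two_le
    omega
  · have hn2 : 2 ≤ n := by
      have : (2 : Int) ≤ (n : Int) := by omega
      exact_mod_cast this
    rw [if_neg h2, pvIsPrimeLoop_iff n 2 (by norm_num)]
    constructor
    · intro hAll
      rw [Nat.prime_def_le_sqrt]
      refine ⟨hn2, fun m hm hms hdvd => ?_⟩
      have hee : (m : Int) * (m : Int) ≤ (n : Int) := by
        exact_mod_cast Nat.le_sqrt.mp hms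
      exact hAll m (by exact_mod_cast hm) hee
        ((PySem.Int.mod_eq_zero_iff_dvd _ _).mpr (Int.natCast_dvd_natCast.mpr hdvd))
    · intro hp e he1 hee
      rw [Ne, PySem.Int.mod_eq_zero_iff_dvd]
      intro hdvd
      obtain ⟨m, rfl⟩ := Int.eq_ofNat_of_zero_le (show 0 ≤ e by omega)
      have hm2 : 2 ≤ m := by exact_mod_cast he1
      have hmm : m * m ≤ n := by exact_mod_cast hee
      have hmn : m ∣ n := by exact_mod_cast hdvd
      exact (Nat.prime_def_le_sqrt.mp hp).2 m hm2 (Nat.le_sqrt.mpr hmm) hmn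

-- ===== VERDICT (by name: the statement is the Claim_ definition above) =====
theorem special_numbers_spec : Claim_equal_special_numbers := by
  unfold Claim_equal_special_numbers
  intro num _
  unfold Spec_special_numbers special_numbers special_numbers_alt
  apply PySem.List.foldl_congr_mem
  intro acc i hi
  have hi0 : 0 ≤ i := ((PySem.List.mem_pyRange_one).mp hi).1
  obtain ⟨n, rfl⟩ := Int.eq_ofNat_of_zero_le hi0
  simp only
  by_cases hcond : n = 0 ∨ n = 4 ∨ n.Prime
  · have hA : ((n : Int)) = (pvPrimeFactors (n : Int)).foldl (fun s j => s + j) 0 := by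
      rw [sumA_eq n]
      exact_mod_cast ((sum_pf_eq_iff n).mpr hcond).symm
    have hB : ((n : Int) = 0 ∨ (n : Int) = 4 ∨ pvIsPrime (n : Int) = true) := by
      rcases hcond with h | h | h
      · exact Or.inl (by exact_mod_cast congrArg (Nat.cast : Nat → Int) h)
      · exact Or.inr (Or.inl (by exact_mod_cast congrArg (Nat.cast : Nat → Int) h))
      · exact Or.inr (Or.inr ((pvIsPrime_iff n).mpr h))
    rw [if_pos hA, if_pos hB, ← hA]
  · have hA : ¬ ((n : Int)) = (pvPrimeFactors (n : Int)).foldl (fun s j => s + j) 0 := by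
      rw [sumA_eq n]
      intro hc
      exact hcond ((sum_pf_eq_iff n).mp (by exact_mod_cast hc.symm))
    have hB : ¬ ((n : Int) = 0 ∨ (n : Int) = 4 ∨ pvIsPrime (n : Int) = true) := by
      rintro (h | h | h)
      · exact hcond (Or.inl (by exact_mod_cast h))
      · exact hcond (Or.inr (Or.inl (by exact_mod_cast h)))
      · exact hcond (Or.inr (Or.inr ((pvIsPrime_iff n).mp h)))
    rw [if_neg hA, if_neg hB]
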